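-- pv_equiv track=rewrite | github.com/MrHamdulay/csc3-capstone | examples/data/Assignment_6/swnrei001/question4.py | markcounter
-- ===== SOURCE A (Python) =====
-- def markcounter(marks):
--     """Counts the number of 1, 2+, 2-, 3 and F in a list of marks;
--     Returns a counted list in order: 1, 2+, 2-, 3, F"""
--     ans = {"1": 0, "2+": 0, "2-": 0, "3": 0, "F": 0}
--     for i in marks:
--         if i >= 75:
--             ans["1"] += 1
--         elif i >= 70:
--             ans["2+"] += 1
--         elif i >= 60:
--             ans["2-"] += 1
--         elif i >= 50:
--             ans["3"] += 1
--         else: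
--             ans["F"] += 1
--     return ans
-- ===== SOURCE B (Python) =====
-- def markcounter(marks):
--     """Counts the number of 1, 2+, 2-, 3 and F in a list of marks;
--     Returns a counted list in order: 1, 2+, 2-, 3, F"""
--     n = len(marks)
--     at_least_50 = sum(1 for m in marks if m >= 50)
--     at_least_60 = sum(1 for m in marks if m >= 60)
--     at_least_70 = sum(1 for m in marks if m >= 70)
--     at_least_75 = sum(1 for m in marks if m >= 75)
--     return {"1": at_least_75,
--             "2+": at_least_70 - at_least_75,
--             "2-": at_least_60 - at_least_70,
--             "3": at_least_50 - at_least_60,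
--             "F": n - at_least_50}
-- ===== Notes on version B (the rewrite author's own statement) =====
-- stated objective: alternative
-- what changed: Replaces the per-mark if-elif binning loop by staged cumulative counting: count how many marks clear each threshold in separate passes and obtain each bin as a difference of adjacent cumulative counts.
import Mathlib
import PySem

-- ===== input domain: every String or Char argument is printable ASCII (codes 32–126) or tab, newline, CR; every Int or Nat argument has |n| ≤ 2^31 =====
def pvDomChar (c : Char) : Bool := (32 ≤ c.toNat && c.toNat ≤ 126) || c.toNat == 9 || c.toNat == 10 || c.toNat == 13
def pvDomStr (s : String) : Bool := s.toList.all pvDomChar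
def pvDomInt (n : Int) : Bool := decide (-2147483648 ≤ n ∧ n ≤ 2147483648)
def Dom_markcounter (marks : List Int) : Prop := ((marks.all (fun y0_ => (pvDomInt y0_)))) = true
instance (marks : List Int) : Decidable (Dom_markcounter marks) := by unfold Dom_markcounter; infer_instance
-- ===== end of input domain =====

-- B replaces A's per-mark if-elif binning loop by staged cumulative threshold counts whose
-- adjacent differences give the bins (objective: alternative, same O(n) cost).


-- ===== PORT A =====
-- ans = {"1":0,…}; for i in marks: if-elif cascade with ans[key] += 1; return ans (items in insertion order)
def markcounter (marks : List Int) : List (String × Int) :=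
  (marks.foldl (fun ans i =>
      if i ≥ 75 then ans.modify "1" 0 (· + 1)
      else if i ≥ 70 then ans.modify "2+" 0 (· + 1)
      else if i ≥ 60 then ans.modify "2-" 0 (· + 1)
      else if i ≥ 50 then ans.modify "3" 0 (· + 1)
      else ans.modify "F" 0 (· + 1))
    (PySem.Dict.ofList [("1", 0), ("2+", 0), ("2-", 0), ("3", 0), ("F", 0)])).items

-- ===== PORT B =====
-- n = len(marks); staged passes sum(1 for m in marks if m >= t) ported as List.countP;
-- the dict of the five bins is assembled once from differences of the cumulative counts.
def markcounter_alt (marks : List Int) : List (String × Int) :=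
  let n : Int := marks.length
  let atLeast50 : Int := marks.countP (fun m => m ≥ 50)
  let atLeast60 : Int := marks.countP (fun m => m ≥ 60)
  let atLeast70 : Int := marks.countP (fun m => m ≥ 70)
  let atLeast75 : Int := marks.countP (fun m => m ≥ 75)
  [("1", atLeast75), ("2+", atLeast70 - atLeast75), ("2-", atLeast60 - atLeast70),
   ("3", atLeast50 - atLeast60), ("F", n - atLeast50)]

-- ===== PRECONDITION & SPEC =====
def Spec_markcounter (marks : List Int) (out : List (String × Int)) : Prop := out = markcounter_alt marks
instance (marks : List Int) (out : List (String × Int)) : Decidable (Spec_markcounter marks out) := by unfold Spec_markcounter; infer_instance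

-- ===== CLAIM (what is proved, stated in full; the proofs are below) =====
def Claim_equal_markcounter : Prop := ∀ (marks : List Int), Dom_markcounter marks → Spec_markcounter marks (markcounter marks)

-- ===== LEMMAS AND PROOFS =====

-- A's loop from a general initial dict ends with each bin equal to its start plus the
-- corresponding difference of cumulative threshold counts.
theorem markcounter_fold_items (marks : List Int) : ∀ (a b c d e : Int),
    (marks.foldl (fun ans i =>
        if i ≥ 75 then ans.modify "1" 0 (· + 1)
        else if i ≥ 70 then ans.modify "2+" 0 (· + 1)
        else if i ≥ 60 then ans.modify "2-" 0 (· + 1)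
        else if i ≥ 50 then ans.modify "3" 0 (· + 1)
        else ans.modify "F" 0 (· + 1))
      (PySem.Dict.ofList [("1", a), ("2+", b), ("2-", c), ("3", d), ("F", e)])).items
    = [("1", a + marks.countP (fun m => m ≥ 75)),
       ("2+", b + (marks.countP (fun m => m ≥ 70) - marks.countP (fun m => m ≥ 75) : Int)),
       ("2-", c + (marks.countP (fun m => m ≥ 60) - marks.countP (fun m => m ≥ 70) : Int)),
       ("3", d + (marks.countP (fun m => m ≥ 50) - marks.countP (fun m => m ≥ 60) : Int)),
       ("F", e + ((marks.length : Int) - marks.countP (fun m => m ≥ 50)))] := by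
  induction marks with
  | nil => intro a b c d e; simp; rfl
  | cons m rest ih =>
    intro a b c d e
    simp only [List.foldl_cons, List.countP_cons, List.length_cons]
    by_cases h75 : m ≥ 75
    · have h70 : m ≥ 70 := by omega
      have h60 : m ≥ 60 := by omega
      have h50 : m ≥ 50 := by omega
      simp only [if_pos h75, if_pos h70, if_pos h60, if_pos h50]
      rw [show (PySem.Dict.ofList [("1", a), ("2+", b), ("2-", c), ("3", d), ("F", e)]).modify "1" 0 (· + 1)
            = PySem.Dict.ofList [("1", a + 1), ("2+", b), ("2-", c), ("3", d), ("F", e)] from rfl,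
          ih (a + 1) b c d e]
      simp [decide_eq_true h75, decide_eq_true h70, decide_eq_true h60, decide_eq_true h50]
      omega
    · by_cases h70 : m ≥ 70
      · have h60 : m ≥ 60 := by omega
        have h50 : m ≥ 50 := by omega
        simp only [if_neg h75, if_pos h70, if_pos h60, if_pos h50]
        rw [show (PySem.Dict.ofList [("1", a), ("2+", b), ("2-", c), ("3", d), ("F", e)]).modify "2+" 0 (· + 1)
              = PySem.Dict.ofList [("1", a), ("2+", b + 1), ("2-", c), ("3", d), ("F", e)] from rfl,
            ih a (b + 1) c d e]
        simp [decide_eq_false h75, decide_eq_true h70, decide_eq_true h60, decide_eq_true h50]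
        omega
      · by_cases h60 : m ≥ 60
        · have h50 : m ≥ 50 := by omega
          simp only [if_neg h75, if_neg h70, if_pos h60, if_pos h50]
          rw [show (PySem.Dict.ofList [("1", a), ("2+", b), ("2-", c), ("3", d), ("F", e)]).modify "2-" 0 (· + 1)
                = PySem.Dict.ofList [("1", a), ("2+", b), ("2-", c + 1), ("3", d), ("F", e)] from rfl,
              ih a b (c + 1) d e]
          simp [decide_eq_false h75, decide_eq_false h70, decide_eq_true h60, decide_eq_true h50]
          omega
        · by_cases h50 : m ≥ 50
          · simp only [if_neg h75, if_neg h70, if_neg h60, if_pos h50]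
            rw [show (PySem.Dict.ofList [("1", a), ("2+", b), ("2-", c), ("3", d), ("F", e)]).modify "3" 0 (· + 1)
                  = PySem.Dict.ofList [("1", a), ("2+", b), ("2-", c), ("3", d + 1), ("F", e)] from rfl,
                ih a b c (d + 1) e]
            simp [decide_eq_false h75, decide_eq_false h70, decide_eq_false h60, decide_eq_true h50]
            omega
          · simp only [if_neg h75, if_neg h70, if_neg h60, if_neg h50]
            rw [show (PySem.Dict.ofList [("1", a), ("2+", b), ("2-", c), ("3", d), ("F", e)]).modify "F" 0 (· + 1)
                  = PySem.Dict.ofList [("1", a), ("2+", b), ("2-", c), ("3", d), ("F", e + 1)] from rfl,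
                ih a b c d (e + 1)]
            simp [decide_eq_false h75, decide_eq_false h70, decide_eq_false h60, decide_eq_false h50]
            omega

-- ===== VERDICT (by name: the statement is the Claim_ definition above) =====
theorem markcounter_spec : Claim_equal_markcounter := by
  intro marks _
  unfold Spec_markcounter markcounter markcounter_alt
  rw [markcounter_fold_items marks 0 0 0 0 0]
  simp
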